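-- pv_equiv track=rewrite | github.com/joaotav/ibc-benchmarking | analysis_functions.py | calc_tx_distribution
-- ===== SOURCE A (Python) =====
-- def calc_tx_distribution(block_data, chain_id):
--     # Get the distribution of transactions in the blocks generated during benchmark
--     tx_distribution = {}
--     results = list()
--     for block in block_data: # For each block
--         num_txs = block['num_transactions'] # Retrieve number of txs inside block
--         if num_txs in tx_distribution.keys():
--             tx_distribution[num_txs] += 1  # Add occurrence to dictionary (1 more block with 'num_txs' transactions)
--         else:
--             tx_distribution[num_txs] = 1 # Initialize key on dictionary (blocks containing 'num_txs' transactions)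
--
--
--     results.append("[+] Transaction distribution analysis for {}:\n".format(chain_id))
--     for key in sorted(tx_distribution.keys()):
--         results.append(" {} tx(s): {} block(s)".format(key, tx_distribution[key]))
--
--     return results
-- ===== SOURCE B (Python) =====
-- def calc_tx_distribution(block_data, chain_id):
--     # Sort all per-block transaction counts once, then emit one line per run
--     # of equal values (run-length encoding) -- no dictionary is built.
--     counts = sorted(block['num_transactions'] for block in block_data)
--     results = ["[+] Transaction distribution analysis for {}:\n".format(chain_id)]
--     i = 0
--     n = len(counts)
--     while i < n:
--         j = i
--         while j < n and counts[j] == counts[i]: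
--             j += 1
--         results.append(" {} tx(s): {} block(s)".format(counts[i], j - i))
--         i = j
--     return results
-- ===== Notes on version B (the rewrite author's own statement) =====
-- stated objective: alternative
-- what changed: B replaces A's counting dictionary with a single sort of all per-block transaction counts followed by a run-length-encoding pass that emits one output line per run of equal values.
import Mathlib
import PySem

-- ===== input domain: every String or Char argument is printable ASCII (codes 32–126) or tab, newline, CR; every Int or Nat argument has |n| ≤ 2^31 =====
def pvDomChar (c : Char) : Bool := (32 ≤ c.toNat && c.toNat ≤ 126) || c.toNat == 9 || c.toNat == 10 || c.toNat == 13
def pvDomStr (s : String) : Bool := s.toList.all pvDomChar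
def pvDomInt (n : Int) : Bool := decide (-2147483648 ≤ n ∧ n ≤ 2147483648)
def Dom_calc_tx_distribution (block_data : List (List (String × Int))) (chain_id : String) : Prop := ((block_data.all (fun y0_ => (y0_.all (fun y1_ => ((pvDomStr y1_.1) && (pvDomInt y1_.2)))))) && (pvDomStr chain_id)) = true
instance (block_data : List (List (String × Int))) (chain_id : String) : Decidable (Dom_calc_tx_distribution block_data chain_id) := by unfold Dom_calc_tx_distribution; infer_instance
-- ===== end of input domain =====

-- ===== PORT A =====
-- B replaces A's counting dict with sort + run-length encoding; equal return values proved on Pre_ (every block has the 'num_transactions' key).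
-- shared formatting helpers (both Pythons use the same literal format strings and the same dict lookup)
def pvHeader (chain_id : String) : String :=
  "[+] Transaction distribution analysis for " ++ chain_id ++ ":\n"

def pvLine (k c : Int) : String :=
  " " ++ PySem.Int.toStr k ++ " tx(s): " ++ PySem.Int.toStr c ++ " block(s)"

-- block['num_transactions']; total only under Pre_ (Python raises KeyError when the key is absent)
def pvNumTxs (block : List (String × Int)) : Int :=
  (PySem.Dict.mk block).getD "num_transactions" 0

def calc_tx_distribution (block_data : List (List (String × Int))) (chain_id : String) : List String :=
  let tx_distribution : PySem.Dict Int Int :=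
    block_data.foldl (fun d block =>
      let num_txs := pvNumTxs block
      if d.contains num_txs then d.modify num_txs 0 (· + 1) else d.insert num_txs 1)
      PySem.Dict.empty
  let results : List String := [pvHeader chain_id]
  (PySem.List.sorted tx_distribution.keys (fun k => k) false).foldl
    (fun r key => r ++ [pvLine key (tx_distribution.getD key 0)]) results

-- ===== PORT B =====
-- run-length encoding of the sorted count list (Source B's two-pointer while loop as structural recursion over the same sorted list)
def pvRunsAux (x c : Int) : List Int -> List (Int × Int)
  | [] => [(x, c)]
  | y :: ys => if y == x then pvRunsAux x (c + 1) ys else (x, c) :: pvRunsAux y 1 ys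

def pvRuns : List Int -> List (Int × Int)
  | [] => []
  | x :: xs => pvRunsAux x 1 xs

def calc_tx_distribution_alt (block_data : List (List (String × Int))) (chain_id : String) : List String :=
  pvHeader chain_id ::
    (pvRuns (PySem.List.sorted (block_data.map pvNumTxs) (fun k => k) false)).map
      (fun p => pvLine p.1 p.2)

-- ===== PRECONDITION & SPEC =====
-- Pre_ excludes exactly the inputs where A raises KeyError: a block without the 'num_transactions' key.
def Pre_calc_tx_distribution (block_data : List (List (String × Int))) (chain_id : String) : Prop :=
  ∀ block ∈ block_data, (PySem.Dict.mk block).contains "num_transactions" = true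
instance (block_data : List (List (String × Int))) (chain_id : String) : Decidable (Pre_calc_tx_distribution block_data chain_id) := by unfold Pre_calc_tx_distribution; infer_instance

def pvWitness_calc_tx_distribution : (List (List (String × Int))) × String :=
  ([[("num_transactions", 2)], [("num_transactions", 1)], [("num_transactions", 2)]], "chainA")

def Spec_calc_tx_distribution (block_data : List (List (String × Int))) (chain_id : String) (out : List String) : Prop := out = calc_tx_distribution_alt block_data chain_id
instance (block_data : List (List (String × Int))) (chain_id : String) (out : List String) : Decidable (Spec_calc_tx_distribution block_data chain_id out) := by unfold Spec_calc_tx_distribution; infer_instance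

-- ===== CLAIM (what is proved, stated in full; the proofs are below) =====
def Claim_equal_calc_tx_distribution : Prop := ∀ (block_data : List (List (String × Int))) (chain_id : String), Dom_calc_tx_distribution block_data chain_id → Pre_calc_tx_distribution block_data chain_id → Spec_calc_tx_distribution block_data chain_id (calc_tx_distribution block_data chain_id)

-- ===== LEMMAS AND PROOFS =====

-- A's fold over `results` equals the counting dict `counter` of the per-block tx counts
lemma pvDict_eq (bd : List (List (String × Int))) :
    bd.foldl (fun d block =>
      let num_txs := pvNumTxs block
      if d.contains num_txs then d.modify num_txs 0 (· + 1) else d.insert num_txs 1)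
      PySem.Dict.empty
    = PySem.Dict.counter (bd.map pvNumTxs) := by
  rw [PySem.Dict.counter_eq_foldl, List.foldl_map]
  congr 1
  funext d block
  by_cases h : d.contains (pvNumTxs block)
  · simp [h]
  · simp only [h, Bool.false_eq_true, if_neg, not_false_iff]
    simp [PySem.Dict.modify, PySem.Dict.getD_of_not_contains, h]

lemma pvFoldlAdd_sublist : ∀ (xs s : List Int), (List.foldl PySem.Set.add s xs).Sublist (s ++ xs)
  | [], s => by simp
  | x :: xs, s => by
    simp only [List.foldl_cons, PySem.Set.add_eq_ite]
    by_cases h : x ∈ s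
    · simp only [h, if_pos]
      exact (pvFoldlAdd_sublist xs s).trans ((List.sublist_cons_self x xs).append_left s)
    · simp only [h, if_neg, not_false_iff]
      simpa using (pvFoldlAdd_sublist xs (s ++ [x]))

lemma pvDedup_sublist (xs : List Int) : (PySem.List.dedup xs).Sublist xs := by
  simpa using pvFoldlAdd_sublist xs []

lemma pvDiscard_cons_self (s : List Int) (x : Int) :
    PySem.Set.discard (x :: s) x = PySem.Set.discard s x := by
  simp [PySem.Set.discard]

lemma pvDiscard_discard (s : List Int) (x : Int) :
    PySem.Set.discard (PySem.Set.discard s x) x = PySem.Set.discard s x := by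
  simp [PySem.Set.discard, List.filter_filter]

lemma pvDiscard_of_not_mem (s : List Int) (x : Int) (h : x ∉ s) :
    PySem.Set.discard s x = s := by
  simp only [PySem.Set.discard]
  refine List.filter_eq_self.mpr (fun a ha => ?_)
  simpa using fun he : a = x => h (he ▸ ha)

-- run-length encoding of a sorted list: one pair (value, multiplicity) per distinct value
lemma pvRunsAux_spec : ∀ (ws : List Int) (x c : Int), (x :: ws).Pairwise (· ≤ ·) →
    pvRunsAux x c ws
      = (x, c + (ws.count x : Int)) ::
        (PySem.Set.discard (PySem.Set.ofList ws) x).map (fun k => (k, (ws.count k : Int)))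
  | [], x, c, _ => by simp [pvRunsAux, PySem.Set.ofList, PySem.Set.discard]
  | y :: ys, x, c, h => by
    have hxy : x ≤ y := (List.pairwise_cons.mp h).1 y (by simp)
    have hxys : ∀ z ∈ ys, x ≤ z := fun z hz => (List.pairwise_cons.mp h).1 z (by simp [hz])
    have hys : (y :: ys).Pairwise (· ≤ · : Int → Int → Prop) := (List.pairwise_cons.mp h).2
    by_cases hyx : y = x
    · subst hyx
      have ih := pvRunsAux_spec ys y (c + 1)
        (List.pairwise_cons.mpr ⟨hxys, (List.pairwise_cons.mp hys).2⟩)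
      simp only [pvRunsAux, beq_self_eq_true, if_pos, ih]
      refine List.cons_eq_cons.mpr ⟨?_, ?_⟩
      · simp only [List.count_cons_self]; push_cast; ring_nf
      · rw [PySem.Set.ofList_cons, pvDiscard_cons_self, pvDiscard_discard]
        apply List.map_congr_left
        intro k hk
        have hkx : k ≠ y := ((PySem.Set.mem_discard _ _ _).mp hk).2
        simp [List.count_cons, hkx, Ne.symm hkx]
    · have hne : (y == x) = false := by simp [hyx]
      have ih := pvRunsAux_spec ys y 1 hys
      have hxnot : x ∉ (y :: ys) := by
        intro hmem
        rcases List.mem_cons.mp hmem with he | hm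
        · exact hyx he.symm
        · have := (List.pairwise_cons.mp hys).1 x hm
          have : x < y := lt_of_le_of_ne hxy (fun he => hyx he.symm)
          omega
      simp only [pvRunsAux, hne, Bool.false_eq_true, if_neg, not_false_iff, ih]
      refine List.cons_eq_cons.mpr ⟨?_, ?_⟩
      · have h0 : (y :: ys).count x = 0 := List.count_eq_zero.mpr hxnot
        rw [h0]
        norm_num
      · rw [PySem.Set.ofList_cons]
        have hxny : x ∉ PySem.Set.discard (PySem.Set.ofList ys) y := by
          intro hmem
          have hm := (PySem.Set.mem_discard _ _ _).mp hmem
          exact hxnot (List.mem_cons.mpr (Or.inr ((PySem.Set.mem_ofList _ _).mp hm.1)))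
        rw [show PySem.Set.discard (y :: PySem.Set.discard (PySem.Set.ofList ys) y) x
              = y :: PySem.Set.discard (PySem.Set.discard (PySem.Set.ofList ys) y) x by
            simp [PySem.Set.discard, hyx]]
        rw [pvDiscard_of_not_mem _ _ hxny, List.map_cons]
        have hyc : (y :: ys).count y = ys.count y + 1 := by simp
        simp only [hyc]
        refine List.cons_eq_cons.mpr ⟨?_, ?_⟩
        · push_cast; ring_nf
        · apply List.map_congr_left
          intro k hk
          have hky : k ≠ y := ((PySem.Set.mem_discard _ _ _).mp hk).2
          simp [List.count_cons, hky, Ne.symm hky]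

lemma pvRuns_spec (ws : List Int) (h : ws.Pairwise (· ≤ ·)) :
    pvRuns ws = (PySem.List.dedup ws).map (fun k => (k, (ws.count k : Int))) := by
  cases ws with
  | nil => rfl
  | cons x t =>
    rw [show pvRuns (x :: t) = pvRunsAux x 1 t from rfl, pvRunsAux_spec t x 1 h]
    simp only [PySem.List.dedup, PySem.Set.ofList_cons, List.map_cons]
    refine List.cons_eq_cons.mpr ⟨?_, ?_⟩
    · simp only [List.count_cons_self]; push_cast; ring_nf
    · apply List.map_congr_left
      intro k hk
      have hky : k ≠ x := ((PySem.Set.mem_discard _ _ _).mp hk).2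
      simp [List.count_cons, hky, Ne.symm hky]

-- sorting the distinct values = deduplicating the sorted value list
lemma pvSorted_dedup (vs : List Int) :
    PySem.List.sorted (PySem.List.dedup vs) (fun k => k) false
      = PySem.List.dedup (PySem.List.sorted vs (fun k => k) false) := by
  apply PySem.List.sorted_eq_of_perm_of_pairwise_lt
  · refine (List.perm_ext_iff_of_nodup ?_ ?_).mpr ?_
    · exact PySem.List.nodup_dedup _
    · exact PySem.List.nodup_dedup _
    · intro a
      rw [PySem.List.mem_dedup, PySem.List.mem_dedup, PySem.List.mem_sorted]
  · have hle : (PySem.List.dedup (PySem.List.sorted vs (fun k => k) false)).Pairwise (· ≤ ·) := by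
      have := PySem.List.sorted_pairwise vs (fun k => k)
      exact this.sublist (pvDedup_sublist _)
    have hne : (PySem.List.dedup (PySem.List.sorted vs (fun k => k) false)).Pairwise (· ≠ ·) :=
      PySem.List.nodup_dedup _
    exact (hle.and hne).imp (fun ⟨h1, h2⟩ => lt_of_le_of_ne h1 h2)

-- ===== VERDICT (by name: the statement is the Claim_ definition above) =====
theorem calc_tx_distribution_spec : Claim_equal_calc_tx_distribution := by
  intro bd cid _hdom _hpre
  unfold Spec_calc_tx_distribution calc_tx_distribution calc_tx_distribution_alt
  rw [pvDict_eq bd, PySem.List.foldl_append_singleton_eq_map, PySem.Dict.keys_counter]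
  rw [pvRuns_spec _ (PySem.List.sorted_pairwise (bd.map pvNumTxs) (fun k => k)), List.map_map]
  rw [show PySem.Set.ofList (bd.map pvNumTxs) = PySem.List.dedup (bd.map pvNumTxs) from rfl]
  rw [pvSorted_dedup]
  simp only [List.singleton_append, List.cons.injEq, true_and]
  refine List.map_congr_left ?_
  intro k hk
  simp only [Function.comp_apply]
  rw [PySem.Dict.getD_counter,
    (PySem.List.sorted_perm (bd.map pvNumTxs) (fun k => k) false).count_eq k]
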